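-- pv_equiv track=rewrite | github.com/jingxuanf0214/thesis-2p-behavior-align | odor_behavioral_analysis.py | cluster_odor_events_temporal
-- ===== SOURCE A (Python) =====
-- def cluster_odor_events_temporal(events, time_interval_threshold):
--     """
--     Clusters odor events based on temporal closeness.
--
--     Parameters:
--     - events: List of (on_time, off_time) tuples for each odor event.
--     - time_interval_threshold: Maximum allowed gap between events to be in the same cluster.
--
--     Returns:
--     - List of odor event clusters, each represented as a list of events.
--     """
--     clusters = []
--     current_cluster = [events[0]]
--
--     for i in range(1, len(events)):
--         if events[i][0] - current_cluster[-1][1] <= time_interval_threshold: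
--             current_cluster.append(events[i])
--         else:
--             clusters.append(current_cluster)
--             current_cluster = [events[i]]
--     clusters.append(current_cluster)  # Add the last cluster
--
--     return clusters
-- ===== SOURCE B (Python) =====
-- def cluster_odor_events_temporal(events, time_interval_threshold):
--     # Build clusters back-to-front: iterate events in reverse, prepending each
--     # event to the first cluster when the gap to its first event is small enough.
--     clusters = []
--     for ev in reversed(events):
--         if clusters and clusters[0][0][0] - ev[1] <= time_interval_threshold:
--             clusters[0] = [ev] + clusters[0]
--         else:
--             clusters = [[ev]] + clusters
--     return clusters
-- ===== Notes on version B (the rewrite author's own statement) =====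
-- stated objective: alternative
-- what changed: B builds the clusters back-to-front in a single reverse pass, prepending each event to the first cluster (or opening a new one) based on the local gap, instead of A's forward index scan that appends to a mutable current_cluster and flushes it into clusters.
import Mathlib
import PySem

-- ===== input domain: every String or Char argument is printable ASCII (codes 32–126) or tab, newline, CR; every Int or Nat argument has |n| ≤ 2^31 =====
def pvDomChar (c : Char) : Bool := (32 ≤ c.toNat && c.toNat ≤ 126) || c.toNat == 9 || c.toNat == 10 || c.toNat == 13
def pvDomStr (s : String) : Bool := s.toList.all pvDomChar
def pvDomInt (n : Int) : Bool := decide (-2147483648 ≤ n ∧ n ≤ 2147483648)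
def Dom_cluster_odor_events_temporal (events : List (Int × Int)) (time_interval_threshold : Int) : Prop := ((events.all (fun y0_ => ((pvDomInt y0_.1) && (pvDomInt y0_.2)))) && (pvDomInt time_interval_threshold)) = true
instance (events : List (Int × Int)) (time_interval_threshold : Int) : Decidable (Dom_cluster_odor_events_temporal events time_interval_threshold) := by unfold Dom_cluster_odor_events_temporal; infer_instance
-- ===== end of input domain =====

-- B rebuilds the clusters back-to-front in one reverse pass (alternative decomposition, same cost);
-- the equivalence below is about return values (A mutates only its own locals).

-- ===== PORT A =====
def cluster_odor_events_temporal (events : List (Int × Int)) (time_interval_threshold : Int) : List (List (Int × Int)) :=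
  match PySem.List.pyGet? events 0 with
  | none => []   -- Python raises IndexError here (events[0] on empty list); excluded by Pre_
  | some e0 =>
    let st := (PySem.List.pyRange 1 (events.length : Int) 1).foldl
      (fun (p : List (List (Int × Int)) × List (Int × Int)) i =>
        let ev := PySem.List.pyGetD events i (0, 0)
        -- current_cluster[-1]
        let last := (PySem.List.pyGet? p.2 (-1)).getD (0, 0)
        if ev.1 - last.2 ≤ time_interval_threshold then
          (p.1, p.2 ++ [ev])
        else
          (p.1 ++ [p.2], [ev]))
      (([] : List (List (Int × Int))), [e0])
    st.1 ++ [st.2]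

-- ===== PORT B =====
def cluster_odor_events_temporal_alt (events : List (Int × Int)) (time_interval_threshold : Int) : List (List (Int × Int)) :=
  events.foldr
    (fun ev clusters =>
      match clusters with
      | [] => [[ev]]
      | [] :: cs => [ev] :: [] :: cs   -- unreachable: clusters never contains an empty cluster (Python would raise on clusters[0][0])
      | (x :: c) :: cs =>
        if x.1 - ev.2 ≤ time_interval_threshold then (ev :: x :: c) :: cs
        else [ev] :: (x :: c) :: cs)
    []

-- ===== PRECONDITION & SPEC =====
-- Pre_ excludes exactly the empty event list, on which Python A raises IndexError at events[0].
def Pre_cluster_odor_events_temporal (events : List (Int × Int)) (time_interval_threshold : Int) : Prop := events ≠ []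
instance (events : List (Int × Int)) (time_interval_threshold : Int) : Decidable (Pre_cluster_odor_events_temporal events time_interval_threshold) := by unfold Pre_cluster_odor_events_temporal; infer_instance
def pvWitness_cluster_odor_events_temporal : (List (Int × Int)) × Int := ([(0, 1), (3, 4), (10, 11)], 2)

def Spec_cluster_odor_events_temporal (events : List (Int × Int)) (time_interval_threshold : Int) (out : List (List (Int × Int))) : Prop := out = cluster_odor_events_temporal_alt events time_interval_threshold
instance (events : List (Int × Int)) (time_interval_threshold : Int) (out : List (List (Int × Int))) : Decidable (Spec_cluster_odor_events_temporal events time_interval_threshold out) := by unfold Spec_cluster_odor_events_temporal; infer_instance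

-- ===== CLAIM (what is proved, stated in full; the proofs are below) =====
def Claim_equal_cluster_odor_events_temporal : Prop := ∀ (events : List (Int × Int)) (time_interval_threshold : Int), Dom_cluster_odor_events_temporal events time_interval_threshold → Pre_cluster_odor_events_temporal events time_interval_threshold → Spec_cluster_odor_events_temporal events time_interval_threshold (cluster_odor_events_temporal events time_interval_threshold)

-- ===== LEMMAS AND PROOFS =====

-- g2 p l t = (rest of the cluster containing p, the clusters after it) for the tail l following the event p.
def g2 (p : Int × Int) (l : List (Int × Int)) (t : Int) : List (Int × Int) × List (List (Int × Int)) :=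
  match l with
  | [] => ([], [])
  | b :: bs =>
    let r := g2 b bs t
    if b.1 - p.2 ≤ t then (b :: r.1, r.2) else ([], (b :: r.1) :: r.2)

theorem foldl_g2 (t : Int) (l : List (Int × Int)) : ∀ (cls : List (List (Int × Int))) (cur : List (Int × Int)) (p : Int × Int), cur.getLast? = some p →
    (let st := l.foldl (fun (q : List (List (Int × Int)) × List (Int × Int)) ev =>
        if ev.1 - (q.2.getLast?.getD (0, 0)).2 ≤ t then (q.1, q.2 ++ [ev]) else (q.1 ++ [q.2], [ev])) (cls, cur)
     st.1 ++ [st.2]) = cls ++ (cur ++ (g2 p l t).1) :: (g2 p l t).2 := by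
  induction l with
  | nil => intro cls cur p h; simp [g2]
  | cons b bs ih =>
    intro cls cur p h
    simp only [List.foldl_cons, h, Option.getD_some, g2]
    by_cases hc : b.1 - p.2 ≤ t
    · simp only [hc, if_true]
      rw [ih cls (cur ++ [b]) b (by simp)]
      simp
    · simp only [hc, if_false]
      rw [ih (cls ++ [cur]) [b] b (by simp)]
      simp

theorem alt_g2 (t : Int) (l : List (Int × Int)) : ∀ (a : Int × Int),
    cluster_odor_events_temporal_alt (a :: l) t = (a :: (g2 a l t).1) :: (g2 a l t).2 := by
  induction l with
  | nil => intro a; simp [cluster_odor_events_temporal_alt, g2]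
  | cons b bs ih =>
    intro a
    have hb := ih b
    simp only [cluster_odor_events_temporal_alt, List.foldr_cons] at hb ⊢
    rw [hb, g2]
    by_cases hc : b.1 - a.2 ≤ t <;> simp [hc]

-- ===== VERDICT (by name: the statement is the Claim_ definition above) =====
theorem cluster_odor_events_temporal_spec : Claim_equal_cluster_odor_events_temporal := by
  intro events t _ hpre
  unfold Spec_cluster_odor_events_temporal cluster_odor_events_temporal
  match events, hpre with
  | e0 :: rest, _ =>
    simp only [PySem.List.pyGet?_zero_cons]
    rw [PySem.List.foldl_pyRange_pyGetD' (xs := e0 :: rest) (d := ((0:Int),(0:Int)))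
      (f := fun (p : List (List (Int × Int)) × List (Int × Int)) ev =>
        if ev.1 - ((PySem.List.pyGet? p.2 (-1)).getD (0, 0)).2 ≤ t then (p.1, p.2 ++ [ev])
        else (p.1 ++ [p.2], [ev]))
      (init := (([] : List (List (Int × Int))), [e0])) (a := 1) (by norm_num)]
    simp only [show Int.toNat 1 = 1 from rfl, List.drop_succ_cons, List.drop_zero, PySem.List.pyGet?_neg_one]
    rw [foldl_g2 t rest [] [e0] e0 (by simp)]
    rw [alt_g2]
    simp
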